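-- pv_equiv track=rewrite | github.com/ilya-aby/advent-of-code-2023 | D21/d21p1.py | find_steps
-- ===== SOURCE A (Python) =====
-- def find_steps(garden):
--     """
--     Steps through the garden array and returns the number of possible positions after 64 steps
--     """
--
--     # Find the starting position, marked by 'S' in the grid:
--     start_row = None
--     start_col = None
--     for row, line in enumerate(garden):
--         if 'S' in line:
--             start_row = row
--             start_col = line.index('S')
--             break
--
--     position = (start_row, start_col)
--
--     current_positions = [position]
--     steps_taken = 0
--
--     while True:
--         # Find all possible positions we can reach in the next step
--         # This is any position that is one step north, south, east, or west of any possible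
--         # Locations we could have been at right now
--         next_positions = []
--         for pos in current_positions:
--             for new_row, new_col in [(pos[0],pos[1]+1),
--                                      (pos[0],pos[1]-1),
--                                      (pos[0]+1,pos[1]),
--                                      (pos[0]-1,pos[1])]:
--                 if is_valid_position(garden, (new_row, new_col)):
--                     next_positions.append((new_row, new_col))
--
--         current_positions = set(next_positions)
--         steps_taken += 1
--
--
--         # If we can't move anywhere, we're done
--         if not next_positions:
--             break
--         if steps_taken == 64:
--             break
--
--     return len(current_positions)
--
-- def is_valid_position(garden, position):
--     """
--     Checks if a given position is valid to step to in the garden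
--     """
--     row, col = position
--     if row < 0 or row >= len(garden):
--         return False
--     if col < 0 or col >= len(garden[0]):
--         return False
--     if garden[row][col] == '#':
--         return False
--     return True
-- ===== SOURCE B (Python) =====
-- def find_steps(garden):
--     """
--     Steps through the garden array and returns the number of possible positions after 64 steps
--     """
--     rows, cols = len(garden), len(garden[0])
--     start = None
--     for r, line in enumerate(garden):
--         if 'S' in line:
--             start = (r, line.index('S'))
--             break
--     cur = {start}
--     for _ in range(64):
--         cur = {(r, c)
--                for r in range(rows)
--                for c in range(cols)
--                if garden[r][c] != '#'
--                and ((r, c + 1) in cur or (r, c - 1) in cur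
--                     or (r + 1, c) in cur or (r - 1, c) in cur)}
--     return len(cur)
-- ===== Notes on version B (the rewrite author's own statement) =====
-- stated objective: alternative
-- what changed: A expands the frontier push-style (generates the 4 neighbours of every current cell, filters, dedups via set(), with early-exit breaks); B runs a fixed 64 rounds of a pull-style whole-grid set comprehension keeping exactly the walkable cells that have a neighbour in the current set.
-- outside the precondition, e.g. on find_steps(['S#', '#']): A returns 0, B raises IndexError
import Mathlib
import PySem

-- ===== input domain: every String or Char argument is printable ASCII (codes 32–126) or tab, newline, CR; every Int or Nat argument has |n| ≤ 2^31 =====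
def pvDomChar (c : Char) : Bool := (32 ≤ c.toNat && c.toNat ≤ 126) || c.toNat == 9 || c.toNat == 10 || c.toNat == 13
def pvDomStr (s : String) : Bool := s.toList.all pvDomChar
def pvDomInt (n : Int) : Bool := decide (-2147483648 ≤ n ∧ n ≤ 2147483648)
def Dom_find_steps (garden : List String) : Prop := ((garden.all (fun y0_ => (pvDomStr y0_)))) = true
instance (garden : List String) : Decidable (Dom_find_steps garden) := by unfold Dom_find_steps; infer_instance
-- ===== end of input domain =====

-- B replaces A's push-style frontier expansion (neighbours of every current cell, dedup via set,
-- early-exit breaks) by a pull-style fixed 64-round whole-grid scan keeping the walkable cells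
-- adjacent to the current set; same return value on all grids admitted by Pre_.

-- ===== PORT A =====

def is_valid_position (garden : List String) (position : Int × Int) : Bool :=
  if position.1 < 0 || (garden.length : Int) ≤ position.1 then false
  else if position.2 < 0 || (((PySem.List.pyGet? garden 0).getD "").toList.length : Int) ≤ position.2 then false
  -- garden[row][col]: row is in range here; col is in range of garden[row] under Pre_ (IndexError otherwise)
  else if ((PySem.Str.pyGet? ((PySem.List.pyGet? garden position.1).getD "") position.2).getD '?') == '#' then false
  else true

-- the 'for row, line in enumerate(garden): if 'S' in line: … break' search (None → none)
def findStartA : List (Int × String) → Option (Int × Int)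
  | [] => none
  | (row, line) :: rest =>
      if PySem.Str.isIn "S" line then some (row, PySem.Str.find line "S") else findStartA rest

-- one pass of the while-body: neighbours of every current position, appended if valid
def stepA (garden : List String) (cur : List (Int × Int)) : List (Int × Int) :=
  cur.foldl (fun acc pos =>
    [(pos.1, pos.2 + 1), (pos.1, pos.2 - 1), (pos.1 + 1, pos.2), (pos.1 - 1, pos.2)].foldl
      (fun acc2 q => if is_valid_position garden q then acc2 ++ [q] else acc2) acc) []

-- the while loop; fuel = 64 - steps_taken (the two breaks return the same expression len(set(next)))
def loopA (garden : List String) : Nat → List (Int × Int) → Int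
  | 0, cur => ((PySem.Set.ofList (stepA garden cur)).length : Int)
  | 1, cur => ((PySem.Set.ofList (stepA garden cur)).length : Int)
  | (f+2), cur =>
      let next := stepA garden cur
      if next.isEmpty then ((PySem.Set.ofList next).length : Int)
      else loopA garden (f+1) (PySem.Set.ofList next)

def find_steps (garden : List String) : Int :=
  -- position = (start_row, start_col); None start (no 'S') raises in Python → outside Pre_
  let position := (findStartA (PySem.List.enumerate garden 0)).getD (0, 0)
  loopA garden 64 [position]

-- ===== PORT B =====

-- same start search as A ('S' in line, then its first index)
def findStartB : List (Int × String) → Option (Int × Int)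
  | [] => none
  | (row, line) :: rest =>
      if PySem.Str.isIn "S" line then some (row, PySem.Str.find line "S") else findStartB rest

-- the set comprehension: all in-grid walkable cells having a neighbour in cur
def bStep (garden : List String) (rows cols : Int) (cur : List (Int × Int)) : List (Int × Int) :=
  PySem.Set.ofList
    ((PySem.List.pyRange 0 rows 1).flatMap (fun r =>
      ((PySem.List.pyRange 0 cols 1).filter (fun c =>
        (((PySem.Str.pyGet? ((PySem.List.pyGet? garden r).getD "") c).getD '?') != '#')
        && (cur.contains (r, c + 1) || cur.contains (r, c - 1)
            || cur.contains (r + 1, c) || cur.contains (r - 1, c)))).map (fun c => (r, c))))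

def find_steps_alt (garden : List String) : Int :=
  let rows : Int := garden.length
  let cols : Int := (((PySem.List.pyGet? garden 0).getD "").toList.length : Int)
  let start := (findStartB (PySem.List.enumerate garden 0)).getD (0, 0)
  let final := (PySem.List.pyRange 0 64 1).foldl
    (fun cur _ => bStep garden rows cols cur) (PySem.Set.ofList [start])
  (final.length : Int)

-- ===== PRECONDITION & SPEC =====
-- Pre_ excludes grids with no 'S' (A raises TypeError on the None start) and grids where some row is
-- shorter than row 0, on which A's bounds check against row 0 can raise IndexError (or, rarely, A
-- returns before reaching the short row — see the cite); B raises on those inputs too.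
def Pre_find_steps (garden : List String) : Prop :=
  (∃ line ∈ garden, PySem.Str.isIn "S" line = true) ∧
  (∀ line ∈ garden, ((PySem.List.pyGet? garden 0).getD "").toList.length ≤ line.toList.length)
instance (garden : List String) : Decidable (Pre_find_steps garden) := by
  unfold Pre_find_steps; infer_instance

def pvWitness_find_steps : List String := ["S.", ".."]

def Spec_find_steps (garden : List String) (out : Int) : Prop := out = find_steps_alt garden
instance (garden : List String) (out : Int) : Decidable (Spec_find_steps garden out) := by unfold Spec_find_steps; infer_instance

-- ===== CLAIM (what is proved, stated in full; the proofs are below) =====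
def Claim_equal_find_steps : Prop := ∀ (garden : List String), Dom_find_steps garden → Pre_find_steps garden → Spec_find_steps garden (find_steps garden)

-- ===== LEMMAS AND PROOFS =====

-- the two start searches are the same recursion
lemma findStart_eq : ∀ l, findStartA l = findStartB l := by
  intro l
  induction l with
  | nil => rfl
  | cons x rest ih => cases x with | mk r line => simp [findStartA, findStartB, ih]

def nbrs (p : Int × Int) : List (Int × Int) :=
  [(p.1, p.2 + 1), (p.1, p.2 - 1), (p.1 + 1, p.2), (p.1 - 1, p.2)]

lemma stepA_eq (garden : List String) (cur : List (Int × Int)) :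
    stepA garden cur = cur.flatMap (fun pos => (nbrs pos).filter (is_valid_position garden)) := by
  unfold stepA
  simp only [PySem.List.foldl_append_if_eq_filter]
  simpa [nbrs] using PySem.List.foldl_append_eq_flatMap
    (fun pos => (nbrs pos).filter (is_valid_position garden)) cur []

lemma mem_nbrs_comm (p q : Int × Int) : q ∈ nbrs p ↔ p ∈ nbrs q := by
  simp [nbrs, Prod.ext_iff]; omega

lemma mem_stepA (garden : List String) (cur : List (Int × Int)) (q : Int × Int) :
    q ∈ stepA garden cur ↔
      (∃ p ∈ cur, q ∈ nbrs p) ∧ is_valid_position garden q = true := by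
  rw [stepA_eq]
  simp [List.mem_flatMap, List.mem_filter]
  tauto

lemma valid_iff (garden : List String) (q : Int × Int) :
    is_valid_position garden q = true ↔
      (0 ≤ q.1 ∧ q.1 < (garden.length : Int)
        ∧ 0 ≤ q.2 ∧ q.2 < ((((PySem.List.pyGet? garden 0).getD "").toList.length : Int))
        ∧ ¬ (((PySem.Str.pyGet? ((PySem.List.pyGet? garden q.1).getD "") q.2).getD '?') = '#')) := by
  unfold is_valid_position
  split_ifs with h1 h2 h3 <;> simp_all <;> omega

lemma mem_bStep (garden : List String) (cur : List (Int × Int)) (q : Int × Int) :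
    q ∈ bStep garden (garden.length : Int)
        ((((PySem.List.pyGet? garden 0).getD "").toList.length : Int)) cur ↔
      (0 ≤ q.1 ∧ q.1 < (garden.length : Int)
        ∧ 0 ≤ q.2 ∧ q.2 < ((((PySem.List.pyGet? garden 0).getD "").toList.length : Int))
        ∧ ¬ (((PySem.Str.pyGet? ((PySem.List.pyGet? garden q.1).getD "") q.2).getD '?') = '#'))
      ∧ ((q.1, q.2 + 1) ∈ cur ∨ (q.1, q.2 - 1) ∈ cur ∨ (q.1 + 1, q.2) ∈ cur ∨ (q.1 - 1, q.2) ∈ cur) := by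
  unfold bStep
  cases q with | mk a b =>
  simp only [PySem.Set.mem_ofList, List.mem_flatMap, List.mem_map, List.mem_filter,
    PySem.List.mem_pyRange_one, Bool.and_eq_true, Bool.or_eq_true, bne_iff_ne, ne_eq,
    List.contains_iff_mem, Prod.mk.injEq]
  constructor
  · rintro ⟨r, hr, c, ⟨hc, hch, hcont⟩, rfl, rfl⟩
    exact ⟨⟨hr.1, hr.2, hc.1, hc.2, hch⟩, by tauto⟩
  · rintro ⟨⟨h1, h2, h3, h4, h5⟩, hcont⟩
    exact ⟨a, ⟨h1, h2⟩, b, ⟨⟨h3, h4⟩, h5, by tauto⟩, rfl, rfl⟩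

-- one step of A (as a set) and one step of B agree in membership whenever the inputs do
lemma step_mem_iff (garden : List String) (curA curB : List (Int × Int))
    (h : ∀ p, p ∈ curA ↔ p ∈ curB) (q : Int × Int) :
    q ∈ PySem.Set.ofList (stepA garden curA) ↔
      q ∈ bStep garden (garden.length : Int)
        ((((PySem.List.pyGet? garden 0).getD "").toList.length : Int)) curB := by
  rw [PySem.Set.mem_ofList, mem_stepA, mem_bStep, valid_iff]
  constructor
  · rintro ⟨⟨p, hp, hq⟩, hv⟩
    refine ⟨hv, ?_⟩
    rw [mem_nbrs_comm] at hq
    have hp' := (h p).1 hp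
    simp only [nbrs, List.mem_cons, List.not_mem_nil, or_false] at hq
    rcases hq with rfl | rfl | rfl | rfl <;> tauto
  · rintro ⟨hv, hcont⟩
    refine ⟨?_, hv⟩
    rcases hcont with hc | hc | hc | hc
    · refine ⟨(q.1, q.2 + 1), (h _).2 hc, ?_⟩
      rw [mem_nbrs_comm]; simp [nbrs]
    · refine ⟨(q.1, q.2 - 1), (h _).2 hc, ?_⟩
      rw [mem_nbrs_comm]; simp [nbrs]
    · refine ⟨(q.1 + 1, q.2), (h _).2 hc, ?_⟩
      rw [mem_nbrs_comm]; simp [nbrs]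
    · refine ⟨(q.1 - 1, q.2), (h _).2 hc, ?_⟩
      rw [mem_nbrs_comm]; simp [nbrs]

lemma bStep_nil (garden : List String) (rows cols : Int) :
    bStep garden rows cols [] = [] := by
  unfold bStep
  have h1 : ((PySem.List.pyRange 0 rows 1).flatMap (fun r =>
      ((PySem.List.pyRange 0 cols 1).filter (fun c =>
        (((PySem.Str.pyGet? ((PySem.List.pyGet? garden r).getD "") c).getD '?') != '#')
        && (([] : List (Int × Int)).contains (r, c + 1) || ([] : List (Int × Int)).contains (r, c - 1)
            || ([] : List (Int × Int)).contains (r + 1, c) || ([] : List (Int × Int)).contains (r - 1, c)))).map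
        (fun c => (r, c)))) = ([] : List (Int × Int)) := by
    simp
  rw [h1]; rfl

-- B's 64 applications of bStep, innermost first
def bIterN (garden : List String) (rows cols : Int) : Nat → List (Int × Int) → List (Int × Int)
  | 0, cur => cur
  | (n+1), cur => bIterN garden rows cols n (bStep garden rows cols cur)

lemma bIterN_nil (garden : List String) (rows cols : Int) :
    ∀ n, bIterN garden rows cols n [] = []
  | 0 => rfl
  | (n+1) => by rw [bIterN, bStep_nil]; exact bIterN_nil garden rows cols n

lemma foldl_bStep_eq_bIterN (garden : List String) (rows cols : Int) :
    ∀ (l : List Int) (cur : List (Int × Int)),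
      l.foldl (fun c _ => bStep garden rows cols c) cur = bIterN garden rows cols l.length cur
  | [], cur => rfl
  | (x :: xs), cur => by
      simp only [List.foldl_cons, List.length_cons, bIterN]
      exact foldl_bStep_eq_bIterN garden rows cols xs (bStep garden rows cols cur)

lemma length_eq_of_mem_iff {α : Type} {l1 l2 : List α} (h1 : l1.Nodup) (h2 : l2.Nodup)
    (h : ∀ x, x ∈ l1 ↔ x ∈ l2) : l1.length = l2.length :=
  ((List.perm_ext_iff_of_nodup h1 h2).2 h).length_eq

-- main loop equivalence: A's while loop with fuel ≥ 1 vs fuel rounds of B's scan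
lemma loop_eq (garden : List String) :
    ∀ (fuel : Nat) (curA curB : List (Int × Int)), 1 ≤ fuel →
      (∀ p, p ∈ curA ↔ p ∈ curB) →
      loopA garden fuel curA =
        ((bIterN garden (garden.length : Int)
            ((((PySem.List.pyGet? garden 0).getD "").toList.length : Int)) fuel curB).length : Int) := by
  intro fuel
  induction fuel with
  | zero => intro _ _ h; omega
  | succ f ih =>
    intro curA curB _ h
    have hstep := step_mem_iff garden curA curB h
    have hnodA : (PySem.Set.ofList (stepA garden curA)).Nodup := PySem.Set.nodup_ofList _
    have hnodB : (bStep garden (garden.length : Int)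
        ((((PySem.List.pyGet? garden 0).getD "").toList.length : Int)) curB).Nodup :=
      PySem.Set.nodup_ofList _
    match f with
    | 0 =>
      rw [loopA, bIterN, bIterN]
      exact congrArg _ (length_eq_of_mem_iff hnodA hnodB hstep)
    | f' + 1 =>
      rw [loopA, bIterN]
      by_cases hemp : (stepA garden curA).isEmpty
      · rw [if_pos hemp]
        rw [List.isEmpty_iff] at hemp
        have hBnil : bStep garden (garden.length : Int)
            ((((PySem.List.pyGet? garden 0).getD "").toList.length : Int)) curB = [] := by
          rw [List.eq_nil_iff_forall_not_mem]
          intro q hq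
          have h2 := (hstep q).2 hq
          rw [PySem.Set.mem_ofList, hemp] at h2
          simp at h2
        rw [hBnil, bIterN_nil, hemp]
        simp [PySem.Set.ofList]
      · rw [if_neg hemp]
        exact ih _ _ (by omega) (fun q => (hstep q))

-- ===== VERDICT (by name: the statement is the Claim_ definition above) =====
theorem find_steps_spec : Claim_equal_find_steps := by
  intro garden _ _
  show find_steps garden = find_steps_alt garden
  show loopA garden 64 [(findStartA (PySem.List.enumerate garden 0)).getD (0, 0)] =
    ((((PySem.List.pyRange 0 64 1).foldl
        (fun cur _ => bStep garden (garden.length : Int)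
          ((((PySem.List.pyGet? garden 0).getD "").toList.length : Int)) cur)
        (PySem.Set.ofList [(findStartB (PySem.List.enumerate garden 0)).getD (0, 0)])).length : Nat) : Int)
  rw [findStart_eq, foldl_bStep_eq_bIterN]
  have hlen : (PySem.List.pyRange 0 64 1).length = 64 := by decide
  rw [hlen]
  exact loop_eq garden 64 _ _ (by omega) (fun p => by simp [PySem.Set.mem_ofList])
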